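-- pv_equiv track=rewrite | github.com/timotheengineer/Safaricom_Codility_Challenge | binary_second_approach.py | solution
-- ===== SOURCE A (Python) =====
-- def solution(A,B):
--     product = A * B
--
--     binary_value_list = []
--     dividend = product
--     quotient = -1
--
--     while quotient != 0:
--         quotient = dividend // 2
--         remainder = dividend % 2
--         binary_value_list.append(remainder)
--         dividend = quotient
--
--     return binary_value_list.count(1)
-- ===== SOURCE B (Python) =====
-- def solution(A, B):
--     n = A * B
--     count = 0
--     while n:
--         n &= n - 1
--         count += 1
--     return count
-- ===== Notes on version B (the rewrite author's own statement) =====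
-- stated objective: idiomatic
-- what changed: Replaces the divide-by-2 loop that builds a list of remainders and counts the 1s with Brian Kernighan's popcount loop (n &= n-1), counting directly with no list and one iteration per set bit.
import Mathlib
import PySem

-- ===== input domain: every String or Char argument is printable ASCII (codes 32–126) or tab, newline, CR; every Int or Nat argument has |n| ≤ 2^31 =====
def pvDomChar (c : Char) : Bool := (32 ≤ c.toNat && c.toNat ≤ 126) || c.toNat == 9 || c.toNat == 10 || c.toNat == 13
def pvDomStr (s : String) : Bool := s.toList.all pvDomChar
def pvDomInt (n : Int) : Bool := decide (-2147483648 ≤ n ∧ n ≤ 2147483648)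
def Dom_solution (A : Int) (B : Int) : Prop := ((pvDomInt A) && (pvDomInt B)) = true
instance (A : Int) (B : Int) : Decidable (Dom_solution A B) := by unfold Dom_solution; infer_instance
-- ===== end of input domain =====

-- B replaces A's divide-by-2 remainder-list construction with Kernighan's n &= n-1 popcount loop (objective: idiomatic; return value only, no observable mutation in either).

-- ===== PORT A =====
-- A's while loop; the fuel argument is only a totality guard (|product|+1 steps always
-- suffice on the nonnegative products Pre_ admits; on negative products Python's loop never ends).
def loopA : Nat → Int → List Int → List Int
  | 0, _, acc => acc
  | fuel + 1, dividend, acc =>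
    let quotient := PySem.Int.floordiv dividend 2
    let remainder := PySem.Int.mod dividend 2
    if quotient = 0 then acc ++ [remainder] else loopA fuel quotient (acc ++ [remainder])

def solution (A : Int) (B : Int) : Int :=
  let product := A * B
  ((loopA (product.natAbs + 1) product []).count 1 : Int)

-- ===== PORT B =====
-- B's while loop; fuel is again only a totality guard (one step per set bit, ≤ |n|+1 steps).
def loopB : Nat → Int → Int → Int
  | 0, _, count => count
  | fuel + 1, n, count =>
    if n = 0 then count else loopB fuel (PySem.Int.band n (n - 1)) (count + 1)

def solution_alt (A : Int) (B : Int) : Int :=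
  loopB ((A * B).natAbs + 1) (A * B) 0

-- ===== PRECONDITION & SPEC =====
-- Pre_ excludes negative products, where Python's A (and B) loop forever and return nothing.
def Pre_solution (A : Int) (B : Int) : Prop := 0 ≤ A * B
instance (A : Int) (B : Int) : Decidable (Pre_solution A B) := by unfold Pre_solution; infer_instance
def pvWitness_solution : Int × Int := (3, 5)

def Spec_solution (A : Int) (B : Int) (out : Int) : Prop := out = solution_alt A B
instance (A : Int) (B : Int) (out : Int) : Decidable (Spec_solution A B out) := by unfold Spec_solution; infer_instance

-- ===== CLAIM (what is proved, stated in full; the proofs are below) =====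
def Claim_equal_solution : Prop := ∀ (A : Int) (B : Int), Dom_solution A B → Pre_solution A B → Spec_solution A B (solution A B)

-- ===== LEMMAS AND PROOFS =====

lemma and_mod_two (a b : Nat) : ((a &&& b) % 2 = 1) ↔ (a % 2 = 1 ∧ b % 2 = 1) := by
  have h := Nat.testBit_land a b 0
  simp only [Nat.testBit_zero] at h
  constructor
  · intro hk
    have : decide ((a &&& b) % 2 = 1) = true := by simp [hk]
    rw [h] at this
    simp at this
    exact this
  · rintro ⟨ha, hb⟩
    have : (decide (a % 2 = 1) && decide (b % 2 = 1)) = true := by simp [ha, hb]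
    rw [← h] at this
    simpa using this

lemma and_div_two (a b : Nat) : (a &&& b) / 2 = (a / 2) &&& (b / 2) := by
  apply Nat.eq_of_testBit_eq
  intro i
  simp [Nat.testBit_div_two]


lemma and_self_nat (a : Nat) : a &&& a = a := by
  apply Nat.eq_of_testBit_eq
  intro i
  simp

lemma bc_two_mul (j : Nat) : PySem.Int.bitCount ((2 * j : Nat) : Int) = PySem.Int.bitCount (j : Int) := by
  rcases Nat.eq_zero_or_pos j with hj | hj
  · subst hj; simp
  · have h : PySem.Int.bitCount ((2 * j : Nat) : Int)
        = (2 * j) % 2 + PySem.Int.bitCount ((2 * j / 2 : Nat) : Int) :=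
      PySem.Int.bitCount_natCast (by omega)
    rw [h]
    have h1 : 2 * j % 2 = 0 := by omega
    have h2 : 2 * j / 2 = j := by omega
    rw [h1, h2]
    omega

lemma kern (m : Nat) (hm : 0 < m) :
    PySem.Int.bitCount (((m &&& (m - 1)) : Nat) : Int) + 1 = PySem.Int.bitCount (m : Int) := by
  induction m using Nat.strong_induction_on with
  | _ m ih =>
    have hd := and_div_two m (m - 1)
    have hmo := and_mod_two m (m - 1)
    rcases Nat.mod_two_eq_zero_or_one m with he | ho
    · -- m even, m = 2*(m/2), m/2 > 0
      have hk2 : m / 2 > 0 := by omega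
      have h1 : (m - 1) / 2 = m / 2 - 1 := by omega
      have hm0 : (m &&& (m - 1)) % 2 = 0 := by
        rcases Nat.mod_two_eq_zero_or_one (m &&& (m - 1)) with h | h
        · exact h
        · exact absurd (hmo.mp h).1 (by omega)
      have hk : m &&& (m - 1) = 2 * ((m / 2) &&& (m / 2 - 1)) := by
        rw [h1] at hd; omega
      rw [hk, bc_two_mul]
      have := ih (m / 2) (by omega) hk2
      rw [this]
      have h2 : PySem.Int.bitCount (m : Int)
          = m % 2 + PySem.Int.bitCount ((m / 2 : Nat) : Int) :=
        PySem.Int.bitCount_natCast hm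
      rw [h2, he]
      omega
    · -- m odd: m &&& (m-1) = 2*(m/2)
      have h1 : (m - 1) / 2 = m / 2 := by omega
      have hm0 : (m &&& (m - 1)) % 2 = 0 := by
        rcases Nat.mod_two_eq_zero_or_one (m &&& (m - 1)) with h | h
        · exact h
        · have := (hmo.mp h).2; omega
      have hk : m &&& (m - 1) = 2 * (m / 2) := by
        rw [h1, and_self_nat] at hd; omega
      rw [hk, bc_two_mul]
      have h2 : PySem.Int.bitCount (m : Int)
          = m % 2 + PySem.Int.bitCount ((m / 2 : Nat) : Int) :=
        PySem.Int.bitCount_natCast hm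
      rw [h2, ho]
      omega

lemma loopA_spec : ∀ (fuel : Nat) (m : Nat) (acc : List Int), m < fuel →
    (loopA fuel (m : Int) acc).count 1 = acc.count 1 + PySem.Int.bitCount (m : Int) := by
  intro fuel
  induction fuel with
  | zero => intro m acc h; omega
  | succ f ih =>
    intro m acc h
    have hq : PySem.Int.floordiv (m : Int) 2 = ((m / 2 : Nat) : Int) := by
      exact_mod_cast PySem.Int.floordiv_natCast m 2
    have hr : PySem.Int.mod (m : Int) 2 = ((m % 2 : Nat) : Int) := by
      exact_mod_cast PySem.Int.mod_natCast m 2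
    rw [loopA]
    simp only [hq, hr]
    by_cases h0 : ((m / 2 : Nat) : Int) = 0
    · have hm1 : m ≤ 1 := by
        have : m / 2 = 0 := by exact_mod_cast h0
        omega
      rw [if_pos h0]
      interval_cases m <;> simp [List.count_append] <;> decide
    · rw [if_neg h0]
      have hm2 : 2 ≤ m := by
        have : m / 2 ≠ 0 := by exact_mod_cast h0
        omega
      rw [ih (m / 2) (acc ++ [((m % 2 : Nat) : Int)]) (by omega)]
      rw [List.count_append]
      have hbc : PySem.Int.bitCount (m : Int)
          = m % 2 + PySem.Int.bitCount ((m / 2 : Nat) : Int) :=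
        PySem.Int.bitCount_natCast (by omega)
      rw [hbc]
      rcases Nat.mod_two_eq_zero_or_one m with hp | hp <;> rw [hp] <;> simp <;> omega

lemma loopB_spec : ∀ (fuel : Nat) (m : Nat) (c : Int), m < fuel →
    loopB fuel (m : Int) c = c + (PySem.Int.bitCount (m : Int) : Int) := by
  intro fuel
  induction fuel with
  | zero => intro m c h; omega
  | succ f ih =>
    intro m c h
    rw [loopB]
    by_cases h0 : (m : Int) = 0
    · have : m = 0 := by exact_mod_cast h0
      subst this
      simp
    · have hm : 0 < m := by
        have : m ≠ 0 := by exact_mod_cast h0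
        omega
      rw [if_neg h0]
      have hc : ((m : Int) - 1) = ((m - 1 : Nat) : Int) := by
        push_cast [hm]; ring
      rw [hc, PySem.Int.band_natCast]
      rw [ih (m &&& (m - 1)) (c + 1) (by
        have h1 : m &&& (m - 1) ≤ m - 1 := Nat.and_le_right
        omega)]
      have hk := kern m hm
      have : (PySem.Int.bitCount (((m &&& (m - 1)) : Nat) : Int) : Int) + 1
           = (PySem.Int.bitCount (m : Int) : Int) := by exact_mod_cast hk
      omega

-- ===== VERDICT (by name: the statement is the Claim_ definition above) =====
theorem solution_spec : Claim_equal_solution := by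
  intro A B _hdom hpre
  unfold Spec_solution solution solution_alt
  obtain ⟨m, hm⟩ : ∃ n : Nat, A * B = (n : Int) := ⟨(A * B).toNat, (Int.toNat_of_nonneg hpre).symm⟩
  simp only [hm]
  have hna : ((m : Int)).natAbs = m := Int.natAbs_natCast m
  rw [hna, loopA_spec (m + 1) m [] (by omega), loopB_spec (m + 1) m 0 (by omega)]
  simp
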